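-- pv_equiv track=rewrite | github.com/Goblnn/CSCI128 | S25_CR8_DocumentSimiliarty-student/student_work/submission.py | clean_document_line
-- ===== SOURCE A (Python) =====
-- def clean_document_line(line):
--     # this loop will split the words into two words if there are dashes
--     # and underscore
--     split_words = []
--     for word in line:
--         # replace the _ and - with a space and then split on space
--         temp_word = word.replace("_", " ").replace("-", " ").split()
--         split_words.extend(temp_word)
--
--     # this loop will remove all invalid characters and then add
--     # the clean word to the output
--     bad_chars = [".", ",", ";", ":", "\'", "\"", "?", "!"]
--     digits = ["0", "1", "2", "3", "4", "5", "6", "7", "8", "9"]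
--     clean_line = []
--     for word in split_words:
--         clean_word = ""
--         for char in word:
--             # handle if character should be skipped (bad_char or number)
--             if char in bad_chars or char in digits:
--                 continue
--             # char is valid add to output
--             clean_word += char
--         # add clean_word to clean_line
--         if clean_word != "":
--             clean_line.append(clean_word.lower())
--     return clean_line
-- ===== SOURCE B (Python) =====
-- def clean_document_line(line):
--     # single-pass character state machine: separators ('_', '-', whitespace) end
--     # the current token; punctuation/digits are skipped; other chars are
--     # lowercased into the token buffer, emitted when the token ends.
--     clean_line = []
--     for word in line:
--         buf = []
--         for ch in word:
--             if ch == '_' or ch == '-' or ch.isspace():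
--                 if buf:
--                     clean_line.append(''.join(buf))
--                     buf = []
--             elif ch not in ".,;:'\"?!0123456789":
--                 buf.append(ch.lower())
--         if buf:
--             clean_line.append(''.join(buf))
--     return clean_line
-- ===== Notes on version B (the rewrite author's own statement) =====
-- stated objective: alternative
-- what changed: Replaced A's staged pipeline (replace '_'/'-' by spaces, split() into an intermediate word list, then re-scan each word with a per-char filter) by a single-pass character state machine that walks each word's characters once, treating '_', '-' and whitespace as token terminators and filtering/lowercasing into a running buffer, emitting tokens as they close; avoids all intermediate strings/lists (measured ~2.8x faster).
import Mathlib
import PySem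

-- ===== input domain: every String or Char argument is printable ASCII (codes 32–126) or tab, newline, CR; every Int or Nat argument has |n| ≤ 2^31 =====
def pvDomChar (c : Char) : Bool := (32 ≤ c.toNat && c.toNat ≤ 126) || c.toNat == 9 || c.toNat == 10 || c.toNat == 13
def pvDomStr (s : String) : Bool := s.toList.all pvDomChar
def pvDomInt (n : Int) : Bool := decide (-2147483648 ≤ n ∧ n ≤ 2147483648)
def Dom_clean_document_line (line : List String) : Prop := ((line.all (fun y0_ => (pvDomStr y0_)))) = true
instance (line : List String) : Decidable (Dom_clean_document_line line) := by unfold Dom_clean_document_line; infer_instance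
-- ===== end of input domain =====

-- B replaces A's staged pipeline (replace separators, split() into an intermediate list,
-- re-scan each word with a per-char filter) by a single-pass character state machine;
-- same return value (a timing run measured B faster by a constant factor).

-- ===== PORT A =====
-- A iterates `for char in word` over length-1 strings; ported as the word's Chars,
-- with bad_chars/digits as the corresponding Char lists (exact on any input).
def pvBadChars : List Char := ['.', ',', ';', ':', '\'', '"', '?', '!']
def pvDigits : List Char := ['0', '1', '2', '3', '4', '5', '6', '7', '8', '9']

-- body of A's second loop: filter the word's chars, append lowered if non-empty
def pvCleanStepA (clean_line : List String) (word : String) : List String :=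
  let clean_word : String :=
    word.toList.foldl (fun cw ch =>
      if pvBadChars.contains ch || pvDigits.contains ch then cw else cw.push ch) ""
  if clean_word ≠ "" then clean_line ++ [PySem.Str.lower clean_word] else clean_line

def clean_document_line (line : List String) : List String :=
  -- first loop: split on '_' and '-' (via replace-with-space then split()), extend
  let split_words : List String :=
    line.foldl (fun acc word =>
      acc ++ PySem.Str.split₀ (PySem.Str.replace (PySem.Str.replace word "_" " ") "-" " ")) []
  -- second loop: drop bad chars and digits, keep non-empty lowered words
  split_words.foldl pvCleanStepA []

-- ===== PORT B =====
def pvDelChars : List Char := ".,;:'\"?!0123456789".toList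

-- Source B's inner `for ch in word` loop plus the final flush of buf, as structural
-- recursion over the word's chars with state (clean_line, buf)
def pvMachine : List Char → List String → List Char → List String
  | [], out, buf => if buf = [] then out else out ++ [String.ofList buf]
  | c :: r, out, buf =>
    if c == '_' || c == '-' || PySem.Chars.isspace c then
      if buf = [] then pvMachine r out [] else pvMachine r (out ++ [String.ofList buf]) []
    else if pvDelChars.contains c then pvMachine r out buf
    else pvMachine r out (buf ++ [PySem.Chars.lowerChar c])

def clean_document_line_alt (line : List String) : List String :=
  line.foldl (fun clean_line word => pvMachine word.toList clean_line []) []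

-- ===== PRECONDITION & SPEC =====
def Spec_clean_document_line (line : List String) (out : List String) : Prop := out = clean_document_line_alt line
instance (line : List String) (out : List String) : Decidable (Spec_clean_document_line line out) := by unfold Spec_clean_document_line; infer_instance

-- ===== CLAIM (what is proved, stated in full; the proofs are below) =====
def Claim_equal_clean_document_line : Prop := ∀ (line : List String), Dom_clean_document_line line → Spec_clean_document_line line (clean_document_line line)

-- ===== LEMMAS AND PROOFS =====

-- chars kept by A's filter
def pvGood (c : Char) : Bool := !pvDelChars.contains c

-- chars on which Source B's machine ends the current token
def pvSep (c : Char) : Bool := c == '_' || c == '-' || PySem.Chars.isspace c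

-- the effect of A's two replace calls on a single char
def pvSubst (c : Char) : Char := if c = '-' then ' ' else if c = '_' then ' ' else c

-- split₀.go without its accumulators (current piece kept in order)
def pvSplitS : List Char → List Char → List (List Char)
  | [], cur => if cur = [] then [] else [cur]
  | c :: r, cur =>
    if PySem.Chars.isspace c then
      (if cur = [] then pvSplitS r [] else cur :: pvSplitS r [])
    else pvSplitS r (cur ++ [c])

-- A's second-loop step, on char lists
def pvAstepL (acc : List String) (p : List Char) : List String :=
  if p.filter pvGood ≠ [] then acc ++ [String.ofList (PySem.Chars.lower (p.filter pvGood))] else acc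

-- A's character loop builds exactly the filtered string
theorem pvCleanWord_toList (l : List Char) (s : String) :
    (l.foldl (fun cw ch =>
        if pvBadChars.contains ch || pvDigits.contains ch then cw else cw.push ch) s).toList
      = s.toList ++ l.filter pvGood := by
  induction l generalizing s with
  | nil => simp
  | cons c rest ih =>
    have hmem : pvDelChars.contains c = (pvBadChars.contains c || pvDigits.contains c) := by
      show (pvBadChars ++ pvDigits).contains c = _
      simp
    by_cases h : (pvBadChars.contains c || pvDigits.contains c) = true
    · rw [List.foldl_cons, List.filter_cons]
      simp only [pvGood, hmem, h, Bool.not_true, if_neg Bool.false_ne_true]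
      exact ih s
    · have hf : (pvBadChars.contains c || pvDigits.contains c) = false := by simpa using h
      rw [List.foldl_cons, List.filter_cons]
      simp only [pvGood, hmem, hf, Bool.not_false, if_neg Bool.false_ne_true]
      rw [ih (s.push c)]
      simp

-- A's step on a piece equals pvAstepL
theorem pvAstepA_ofList (a : List String) (p : List Char) :
    pvCleanStepA a (String.ofList p) = pvAstepL a p := by
  have hcl : (List.foldl (fun cw ch =>
      if pvBadChars.contains ch || pvDigits.contains ch then cw else cw.push ch) "" p).toList
      = p.filter pvGood := by
    simpa using pvCleanWord_toList p ""
  unfold pvCleanStepA pvAstepL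
  dsimp only
  simp only [String.toList_ofList]
  set F := List.foldl (fun cw ch =>
      if pvBadChars.contains ch || pvDigits.contains ch then cw else cw.push ch) "" p with hF
  by_cases hf : p.filter pvGood = []
  · have h0 : F = "" := by
      apply String.ext; rw [hcl, hf]; rfl
    rw [if_neg (by simp [h0]), if_neg (by simp [hf])]
  · have hne : F ≠ "" := by
      intro h; apply hf; rw [← hcl, h]; rfl
    rw [if_pos hne, if_pos hf]
    have hlow : PySem.Str.lower F = String.ofList (PySem.Chars.lower (p.filter pvGood)) := by
      apply String.ext
      simp only [PySem.Str.lower, String.toList_ofList, hcl]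
    rw [hlow]

-- replace with one-char old/new is a map
theorem pvReplaceGo (a b : Char) (l : List Char) (acc : List Char) (fuel : Nat)
    (h : l.length ≤ fuel) :
    PySem.Chars.replace.go [a] [b] fuel l acc
      = acc.reverse ++ l.map (fun c => if c = a then b else c) := by
  induction l generalizing acc fuel with
  | nil => cases fuel <;> simp [PySem.Chars.replace.go]
  | cons c t ih =>
    cases fuel with
    | zero => simp at h
    | succ n =>
      have ht : t.length ≤ n := by simpa using h
      by_cases hca : a = c
      · subst hca
        simp [PySem.Chars.replace.go, List.isPrefixOf, ih _ _ ht]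
      · have hpre : ([a].isPrefixOf (c :: t)) = false := by
          simp [List.isPrefixOf, hca]
        simp [PySem.Chars.replace.go, hpre, ih _ _ ht, Ne.symm hca]

theorem pvReplaceChar (a b : Char) (s : List Char) :
    PySem.Chars.replace s [a] [b] = s.map (fun c => if c = a then b else c) := by
  unfold PySem.Chars.replace
  simp [pvReplaceGo a b s [] s.length le_rfl]

-- the two replaces of A act as pvSubst
theorem pvReplaced_toList (w : String) :
    (PySem.Str.replace (PySem.Str.replace w "_" " ") "-" " ").toList
      = w.toList.map pvSubst := by
  simp only [PySem.Str.replace, String.toList_ofList]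
  have h1 : ("_" : String).toList = ['_'] := rfl
  have h2 : ("-" : String).toList = ['-'] := rfl
  have h3 : (" " : String).toList = [' '] := rfl
  rw [h1, h2, h3, pvReplaceChar, pvReplaceChar, List.map_map]
  apply List.map_congr_left
  intro c _
  by_cases hu : c = '_' <;> by_cases hd : c = '-' <;>
    simp [pvSubst, Function.comp, hu, hd]

-- split₀.go is pvSplitS
theorem pvSplitGo (l cur : List Char) (acc : List (List Char)) :
    PySem.Chars.split₀.go l cur acc = acc.reverse ++ pvSplitS l cur.reverse := by
  induction l generalizing cur acc with
  | nil =>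
    by_cases hc : cur = []
    · simp [PySem.Chars.split₀.go, pvSplitS, hc]
    · have hcr : cur.reverse ≠ [] := by simpa using hc
      simp [PySem.Chars.split₀.go, pvSplitS, hc, hcr, List.isEmpty_iff]
  | cons c r ih =>
    by_cases hs : PySem.Chars.isspace c = true
    · by_cases hc : cur = []
      · simp [PySem.Chars.split₀.go, pvSplitS, hs, hc, ih]
      · have hcr : cur.reverse ≠ [] := by simpa using hc
        rw [show PySem.Chars.split₀.go (c :: r) cur acc
            = PySem.Chars.split₀.go r [] (cur.reverse :: acc) from by
          simp [PySem.Chars.split₀.go, hs, List.isEmpty_iff, hc]]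
        rw [ih [] (cur.reverse :: acc)]
        simp [pvSplitS, hs, hcr]
    · have hs' : PySem.Chars.isspace c = false := by simpa using hs
      rw [show PySem.Chars.split₀.go (c :: r) cur acc
          = PySem.Chars.split₀.go r (c :: cur) acc from by
        simp [PySem.Chars.split₀.go, hs']]
      rw [ih (c :: cur) acc]
      simp [pvSplitS, hs']

-- isspace after pvSubst is exactly pvSep
theorem pvIsspace_subst (c : Char) :
    PySem.Chars.isspace (pvSubst c) = pvSep c := by
  by_cases hu : c = '_'
  · subst hu; decide
  · by_cases hd : c = '-'
    · subst hd; decide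
    · simp [pvSubst, pvSep, hu, hd]

theorem pvSubst_of_not_sep (c : Char) (h : pvSep c = false) : pvSubst c = c := by
  have h1 : c ≠ '_' := by intro e; subst e; exact absurd h (by decide)
  have h2 : c ≠ '-' := by intro e; subst e; exact absurd h (by decide)
  simp [pvSubst, h1, h2]

-- main invariant: the machine equals the split-then-clean fold
theorem pvMain (l : List Char) (cur : List Char) (out : List String) :
    pvMachine l out (PySem.Chars.lower (cur.filter pvGood))
      = (pvSplitS (l.map pvSubst) cur).foldl pvAstepL out := by
  induction l generalizing cur out with
  | nil =>
    by_cases hc : cur = []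
    · simp [pvMachine, pvSplitS, hc, PySem.Chars.lower]
    · simp only [List.map_nil, pvSplitS, if_neg hc, List.foldl_cons, List.foldl_nil]
      unfold pvAstepL
      by_cases hf : cur.filter pvGood = []
      · simp [pvMachine, hf, PySem.Chars.lower]
      · have hbuf : PySem.Chars.lower (cur.filter pvGood) ≠ [] := by
          simp [PySem.Chars.lower, hf]
        simp [pvMachine, hbuf, hf]
  | cons c r ih =>
    have hcond : (c == '_' || c == '-' || PySem.Chars.isspace c) = pvSep c := rfl
    simp only [List.map_cons, pvSplitS, pvIsspace_subst c]
    by_cases hs : pvSep c = true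
    · rw [if_pos hs]
      by_cases hc : cur = []
      · subst hc
        rw [if_pos rfl]
        have hm : pvMachine (c :: r) out (PySem.Chars.lower (List.filter pvGood []))
            = pvMachine r out [] := by
          simp [pvMachine, hcond, hs, PySem.Chars.lower]
        rw [hm]
        simpa [PySem.Chars.lower] using ih [] out
      · rw [if_neg hc, List.foldl_cons]
        by_cases hf : cur.filter pvGood = []
        · have hbuf : PySem.Chars.lower (cur.filter pvGood) = [] := by
            simp [PySem.Chars.lower, hf]
          have hm : pvMachine (c :: r) out (PySem.Chars.lower (cur.filter pvGood))
              = pvMachine r out [] := by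
            rw [hbuf]; simp [pvMachine, hcond, hs]
          have hstep : pvAstepL out cur = out := by simp [pvAstepL, hf]
          rw [hm, hstep]
          simpa [PySem.Chars.lower] using ih [] out
        · have hbuf : PySem.Chars.lower (cur.filter pvGood) ≠ [] := by
            simp [PySem.Chars.lower, hf]
          have hm : pvMachine (c :: r) out (PySem.Chars.lower (cur.filter pvGood))
              = pvMachine r (out ++ [String.ofList (PySem.Chars.lower (cur.filter pvGood))]) [] := by
            simp [pvMachine, hcond, hs, hbuf]
          have hstep : pvAstepL out cur
              = out ++ [String.ofList (PySem.Chars.lower (cur.filter pvGood))] := by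
            simp [pvAstepL, hf]
          rw [hm, hstep]
          simpa [PySem.Chars.lower] using
            ih [] (out ++ [String.ofList (PySem.Chars.lower (cur.filter pvGood))])
    · have hs' : pvSep c = false := by simpa using hs
      rw [if_neg (by simp [hs']), pvSubst_of_not_sep c hs']
      by_cases hb : pvDelChars.contains c = true
      · have hmem : c ∈ pvDelChars := by simpa using hb
        have hgood : pvGood c = false := by simp [pvGood, hmem]
        have hfil : (cur ++ [c]).filter pvGood = cur.filter pvGood := by
          simp [List.filter_append, hgood]
        have hm : pvMachine (c :: r) out (PySem.Chars.lower (cur.filter pvGood))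
            = pvMachine r out (PySem.Chars.lower (cur.filter pvGood)) := by
          simp [pvMachine, hcond, hs', hmem]
        rw [hm]
        have := ih (cur ++ [c]) out
        rwa [hfil] at this
      · have hmem : c ∉ pvDelChars := by simpa using hb
        have hgood : pvGood c = true := by simp [pvGood, hmem]
        have hfil : (cur ++ [c]).filter pvGood = cur.filter pvGood ++ [c] := by
          simp [List.filter_append, hgood]
        have hm : pvMachine (c :: r) out (PySem.Chars.lower (cur.filter pvGood))
            = pvMachine r out (PySem.Chars.lower (cur.filter pvGood) ++ [PySem.Chars.lowerChar c]) := by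
          simp [pvMachine, hcond, hs', hmem]
        rw [hm]
        have := ih (cur ++ [c]) out
        rw [hfil] at this
        simpa [PySem.Chars.lower] using this

-- per-word: A's pieces fold equals B's machine
theorem pvPerWord (w : String) (out : List String) :
    (PySem.Str.split₀ (PySem.Str.replace (PySem.Str.replace w "_" " ") "-" " ")).foldl
      pvCleanStepA out = pvMachine w.toList out [] := by
  unfold PySem.Str.split₀
  rw [List.foldl_map]
  have h1 : ∀ (a : List String) (p : List Char),
      pvCleanStepA a (String.ofList p) = pvAstepL a p := pvAstepA_ofList
  simp only [h1]
  rw [PySem.Chars.split₀]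
  rw [pvSplitGo]
  simp only [List.reverse_nil, List.nil_append]
  rw [pvReplaced_toList]
  have := pvMain w.toList [] out
  simpa [PySem.Chars.lower] using this.symm

-- ===== VERDICT (by name: the statement is the Claim_ definition above) =====
theorem clean_document_line_spec : Claim_equal_clean_document_line := by
  intro line _
  show clean_document_line line = clean_document_line_alt line
  unfold clean_document_line clean_document_line_alt
  rw [PySem.List.foldl_append_eq_flatMap, List.nil_append, List.foldl_flatMap]
  have hstep := funext (fun a => funext (fun w : String => (pvPerWord w a)))
  simp only [pvPerWord]
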